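-- pv_equiv track=rewrite | github.com/seemoo-lab/openwifipass | openwifipass/OPACK.py | encodeInt
-- ===== SOURCE A (Python) =====
-- class OPACKEncodeError(Exception):
--     pass
--
-- def encodeInt(value):
--     if value < 0x27:
--         return [value + 0x08]
--     for i in range(0, 4):
--         if value < pow(2, 8 * (i + 1)):
--             data = list(value.to_bytes(i + 1, byteorder="big"))
--             data.insert(0, 0x30 + i)
--             return data
--     raise OPACKEncodeError(f"Failed to encode {value} (type int)")
-- ===== SOURCE B (Python) =====
-- class OPACKEncodeError(Exception):
--     pass
--
-- def encodeInt(value):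
--     if value < 0x27:
--         return [value + 0x08]
--     num_bytes = (value.bit_length() + 7) // 8
--     if num_bytes <= 4:
--         return [0x30 + num_bytes - 1] + list(value.to_bytes(num_bytes, "big"))
--     raise OPACKEncodeError(f"Failed to encode {value} (type int)")
-- ===== Notes on version B (the rewrite author's own statement) =====
-- stated objective: simpler
-- what changed: B replaces A's four-step linear search with pow comparisons by a closed-form byte width computed from value.bit_length() and a single guarded return.
import Mathlib
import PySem

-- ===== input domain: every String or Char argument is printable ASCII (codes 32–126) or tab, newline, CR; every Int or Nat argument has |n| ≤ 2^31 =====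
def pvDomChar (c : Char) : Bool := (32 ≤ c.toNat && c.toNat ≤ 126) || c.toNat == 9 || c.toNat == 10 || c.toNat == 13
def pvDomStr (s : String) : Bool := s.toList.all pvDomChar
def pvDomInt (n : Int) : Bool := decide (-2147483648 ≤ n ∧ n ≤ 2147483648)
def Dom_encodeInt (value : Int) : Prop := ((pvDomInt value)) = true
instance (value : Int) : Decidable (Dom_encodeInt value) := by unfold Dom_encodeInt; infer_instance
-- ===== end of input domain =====

-- B replaces A's linear search over byte widths (range(4) + pow comparisons) by a closed-form
-- width (value.bit_length() + 7) // 8; objective: simpler. Equal on the whole domain.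

-- shared library-call port: int.to_bytes(n, byteorder="big") as a list of byte values
def toBytesBE : Nat → Int → List Int
  | 0, _ => []
  | n + 1, v => toBytesBE n (PySem.Int.floordiv v 256) ++ [PySem.Int.mod v 256]

-- ===== PORT A =====
-- the 'for i in range(0, 4)' loop; [] stands for the fall-through raise (unreachable on Dom)
def encodeIntLoop (value : Int) : List Nat → List Int
  | [] => []
  | i :: rest =>
    if value < 2 ^ (8 * (i + 1)) then ((0x30 : Int) + i) :: toBytesBE (i + 1) value
    else encodeIntLoop value rest

def encodeInt (value : Int) : List Int :=
  if value < 0x27 then [value + 0x08]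
  else encodeIntLoop value (List.range 4)

-- ===== PORT B =====
-- [] stands for the raise branch (num_bytes > 4, unreachable on Dom)
def encodeInt_alt (value : Int) : List Int :=
  if value < 0x27 then [value + 0x08]
  else
    let numBytes := (PySem.Int.bitLength value + 7) / 8
    if numBytes ≤ 4 then ((0x30 : Int) + numBytes - 1) :: toBytesBE numBytes value
    else []

-- ===== PRECONDITION & SPEC =====
def Spec_encodeInt (value : Int) (out : List Int) : Prop := out = encodeInt_alt value
instance (value : Int) (out : List Int) : Decidable (Spec_encodeInt value out) := by unfold Spec_encodeInt; infer_instance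

-- ===== CLAIM (what is proved, stated in full; the proofs are below) =====
def Claim_equal_encodeInt : Prop := ∀ (value : Int), Dom_encodeInt value → Spec_encodeInt value (encodeInt value)

-- ===== LEMMAS AND PROOFS =====

-- the closed-form byte width equals i + 1 exactly on A's i-th loop bracket
lemma nb_eq (v : Int) (i : Nat) (hpos : 0 < v)
    (hi : (2 : Int) ^ (8 * i) ≤ v) (hlt : v < 2 ^ (8 * (i + 1))) :
    (PySem.Int.bitLength v + 7) / 8 = i + 1 := by
  have hv : (v.natAbs : Int) = v := Int.natAbs_of_nonneg (le_of_lt hpos)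
  have hiN : 2 ^ (8 * i) ≤ v.natAbs := by
    have : (2 : Int) ^ (8 * i) ≤ (v.natAbs : Int) := by rw [hv]; exact hi
    exact_mod_cast this
  have hltN : v.natAbs < 2 ^ (8 * (i + 1)) := by
    have : (v.natAbs : Int) < (2 : Int) ^ (8 * (i + 1)) := by rw [hv]; exact hlt
    exact_mod_cast this
  have h1 : v.natAbs < 2 ^ PySem.Int.bitLength v := PySem.Int.lt_two_pow_bitLength v
  have h2 : 2 ^ (PySem.Int.bitLength v - 1) ≤ v.natAbs :=
    PySem.Int.two_pow_bitLength_le v (by omega)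
  have hub : PySem.Int.bitLength v ≤ 8 * (i + 1) := by
    by_contra hc
    push Not at hc
    have : 2 ^ (8 * (i + 1)) ≤ 2 ^ (PySem.Int.bitLength v - 1) :=
      Nat.pow_le_pow_right (by norm_num) (by omega)
    omega
  have hlb : 8 * i < PySem.Int.bitLength v := by
    by_contra hc
    push Not at hc
    have : 2 ^ PySem.Int.bitLength v ≤ 2 ^ (8 * i) :=
      Nat.pow_le_pow_right (by norm_num) hc
    omega
  omega

-- ===== VERDICT (by name: the statement is the Claim_ definition above) =====
theorem encodeInt_spec : Claim_equal_encodeInt := by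
  intro value hdom
  unfold Spec_encodeInt encodeInt encodeInt_alt
  by_cases h : value < 0x27
  · simp [h]
  · have hpos : 0 < value := by omega
    have hdom' : value ≤ 2147483648 := by
      unfold Dom_encodeInt pvDomInt at hdom
      simp at hdom; omega
    have hrange : List.range 4 = [0, 1, 2, 3] := by decide
    simp only [h, if_false, hrange, encodeIntLoop]
    by_cases h1 : value < 2 ^ (8 * (0 + 1))
    · have := nb_eq value 0 hpos (by norm_num; omega) h1
      simp only [this, if_pos h1]
      norm_num
    · by_cases h2 : value < 2 ^ (8 * (1 + 1))
      · have := nb_eq value 1 hpos (by norm_num at h1 ⊢; omega) h2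
        simp only [this, if_neg h1, if_pos h2]
        norm_num
      · by_cases h3 : value < 2 ^ (8 * (2 + 1))
        · have := nb_eq value 2 hpos (by norm_num at h2 ⊢; omega) h3
          simp only [this, if_neg h1, if_neg h2, if_pos h3]
          norm_num
        · have h4 : value < 2 ^ (8 * (3 + 1)) := by norm_num; omega
          have := nb_eq value 3 hpos (by norm_num at h3 ⊢; omega) h4
          simp only [this, if_neg h1, if_neg h2, if_neg h3, if_pos h4]
          norm_num
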